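-- pv_equiv track=rewrite | github.com/mkbui/EfiensCTF-Writeup | round2/web/rapper_hub/rapper_sol.py | bypass
-- ===== SOURCE A (Python) =====
-- def bypass(query):
--   rep = {
--     'union': 'UnIoN',
--     'select': 'sElECt',
--     'join': 'jOiN',
--     'from': 'fRoM',
--     ' ': '%0b',
--   }
--
--   for i, j in rep.items():
--     query = query.replace(i, j)
--   return query
-- ===== SOURCE B (Python) =====
-- def bypass(query):
--   keys = (('union','UnIoN'),('select','sElECt'),('join','jOiN'),('from','fRoM'),(' ','%0b'))
--   out = []
--   i = 0
--   n = len(query)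
--   while i < n:
--     for k, v in keys:
--       if query.startswith(k, i):
--         out.append(v)
--         i += len(k)
--         break
--     else:
--       out.append(query[i])
--       i += 1
--   return ''.join(out)
-- ===== Notes on version B (the rewrite author's own statement) =====
-- stated objective: alternative
-- what changed: Replaces five sequential full-string replace passes by one explicit left-to-right scan that checks the five keys at each position and emits the replacement immediately; correct because no key can start inside another key's occurrence or inside any replacement text.
import Mathlib
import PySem

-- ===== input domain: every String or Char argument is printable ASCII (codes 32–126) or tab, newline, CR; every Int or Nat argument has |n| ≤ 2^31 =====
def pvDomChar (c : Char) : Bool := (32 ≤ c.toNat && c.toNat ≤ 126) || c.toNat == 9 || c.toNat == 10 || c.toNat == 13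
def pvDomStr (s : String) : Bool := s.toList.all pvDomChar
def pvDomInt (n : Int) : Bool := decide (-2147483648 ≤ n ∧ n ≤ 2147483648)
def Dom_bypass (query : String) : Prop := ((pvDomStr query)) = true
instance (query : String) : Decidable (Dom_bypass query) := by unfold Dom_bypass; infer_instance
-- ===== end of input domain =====

-- B replaces A's five sequential full-string replace passes by one left-to-right scan
-- that checks the five keys at each position (alternative decomposition, not claimed faster).

-- ===== PORT A =====
-- A: for i, j in rep.items(): query = query.replace(i, j)
def bypass (query : String) : String :=
  let rep : List (String × String) :=
    [("union", "UnIoN"), ("select", "sElECt"), ("join", "jOiN"), ("from", "fRoM"), (" ", "%0b")]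
  rep.foldl (fun q ij => PySem.Str.replace q ij.1 ij.2) query

-- ===== PORT B =====
-- the five key/replacement pairs of Source B, as char lists
def pUnion : List Char := ['u', 'n', 'i', 'o', 'n']
def rUnion : List Char := ['U', 'n', 'I', 'o', 'N']
def pSelect : List Char := ['s', 'e', 'l', 'e', 'c', 't']
def rSelect : List Char := ['s', 'E', 'l', 'E', 'C', 't']
def pJoin : List Char := ['j', 'o', 'i', 'n']
def rJoin : List Char := ['j', 'O', 'i', 'N']
def pFrom : List Char := ['f', 'r', 'o', 'm']
def rFrom : List Char := ['f', 'R', 'o', 'M']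
def rSpace : List Char := ['%', '0', 'b']

-- B's while loop: at each position try the keys in order, emit the replacement and skip
-- the key, otherwise copy one character
def scanB : List Char → List Char
  | [] => []
  | c :: t =>
    if pUnion.isPrefixOf (c :: t) then rUnion ++ scanB (t.drop 4)
    else if pSelect.isPrefixOf (c :: t) then rSelect ++ scanB (t.drop 5)
    else if pJoin.isPrefixOf (c :: t) then rJoin ++ scanB (t.drop 3)
    else if pFrom.isPrefixOf (c :: t) then rFrom ++ scanB (t.drop 3)
    else if c = ' ' then rSpace ++ scanB t
    else c :: scanB t
  termination_by l => l.length
  decreasing_by all_goals simp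

def bypass_alt (query : String) : String := String.ofList (scanB query.toList)

-- ===== PRECONDITION & SPEC =====
def Spec_bypass (query : String) (out : String) : Prop := out = bypass_alt query
instance (query : String) (out : String) : Decidable (Spec_bypass query out) := by unfold Spec_bypass; infer_instance

-- ===== CLAIM (what is proved, stated in full; the proofs are below) =====
def Claim_equal_bypass : Prop := ∀ (query : String), Dom_bypass query → Spec_bypass query (bypass query)

-- ===== LEMMAS AND PROOFS =====

-- simple accumulator-free form of PySem.Chars.replace (for a nonempty pattern)
def repl (old new : List Char) : List Char → List Char
  | [] => []
  | c :: t =>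
    if old.isPrefixOf (c :: t) then new ++ repl old new (t.drop (old.length - 1))
    else c :: repl old new t
  termination_by l => l.length
  decreasing_by all_goals simp

theorem go_eq_repl (old new : List Char) (h : old ≠ []) :
    ∀ (fuel : Nat) (l acc : List Char), l.length ≤ fuel →
      PySem.Chars.replace.go old new fuel l acc = acc.reverse ++ repl old new l := by
  intro fuel
  induction fuel with
  | zero =>
    intro l acc hl
    have : l = [] := List.eq_nil_of_length_eq_zero (Nat.le_zero.mp hl)
    subst this
    simp [PySem.Chars.replace.go, repl]
  | succ n ih =>
    intro l acc hl
    cases l with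
    | nil => simp [PySem.Chars.replace.go, repl]
    | cons c t =>
      by_cases hp : old.isPrefixOf (c :: t)
      · have hlen : 1 ≤ old.length := by
          cases old with
          | nil => exact absurd rfl h
          | cons _ _ => simp
        have hdrop : (c :: t).drop old.length = t.drop (old.length - 1) := by
          cases old with
          | nil => exact absurd rfl h
          | cons _ ot => simp
        have hfuel : ((c :: t).drop old.length).length ≤ n := by
          rw [List.length_drop, List.length_cons]
          simp only [List.length_cons] at hl
          omega
        rw [show PySem.Chars.replace.go old new (n + 1) (c :: t) acc =
              PySem.Chars.replace.go old new n ((c :: t).drop old.length) (new.reverse ++ acc) by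
            simp [PySem.Chars.replace.go, hp]]
        rw [ih ((c :: t).drop old.length) (new.reverse ++ acc) hfuel]
        rw [repl, if_pos hp, hdrop]
        simp
      · rw [show PySem.Chars.replace.go old new (n + 1) (c :: t) acc =
              PySem.Chars.replace.go old new n t (c :: acc) by
            simp [PySem.Chars.replace.go, hp]]
        rw [ih t (c :: acc) (by simp at hl ⊢; omega)]
        rw [repl, if_neg hp]
        simp

theorem replace_eq_repl (s old new : List Char) (h : old ≠ []) :
    PySem.Chars.replace s old new = repl old new s := by
  have hgo := go_eq_repl old new h s.length s [] le_rfl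
  simp only [PySem.Chars.replace, hgo, List.reverse_nil, List.nil_append]
  rw [if_neg (by simp [List.isEmpty_iff, h])]

theorem repl_nil (old new : List Char) : repl old new [] = [] := by simp [repl]

theorem repl_cons_neg (old new : List Char) (c : Char) (t : List Char)
    (h : ¬ old.isPrefixOf (c :: t)) : repl old new (c :: t) = c :: repl old new t := by
  rw [repl, if_neg h]

-- the pattern matched at the front: replace it and continue after it
theorem repl_append_self (oh : Char) (ot new x : List Char) :
    repl (oh :: ot) new ((oh :: ot) ++ x) = new ++ repl (oh :: ot) new x := by
  have hp : (oh :: ot).isPrefixOf ((oh :: ot) ++ x) :=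
    List.isPrefixOf_iff_prefix.mpr (List.prefix_append _ _)
  rw [show ((oh :: ot) ++ x) = oh :: (ot ++ x) by simp, repl, if_pos (by simp_all)]
  simp

-- the pattern's first char does not occur in r, so no match starts inside r
theorem repl_append_of_head_notin (oh : Char) (ot new : List Char) (r : List Char)
    (hh : oh ∉ r) : ∀ x, repl (oh :: ot) new (r ++ x) = r ++ repl (oh :: ot) new x := by
  induction r with
  | nil => intro x; simp
  | cons c r' ih =>
    intro x
    have hne : oh ≠ c := fun he => hh (by simp [he])
    have hnp : ¬ (oh :: ot).isPrefixOf (c :: (r' ++ x)) := by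
      simp [List.isPrefixOf, hne]
    rw [show (c :: r') ++ x = c :: (r' ++ x) by simp, repl_cons_neg _ _ _ _ hnp,
      ih (fun hm => hh (by simp [hm]))]
    simp

-- replacement never creates a new occurrence: if p (free of the replacement's first
-- char nh) is a prefix of the replaced list, it already was a prefix of the original
theorem prefix_repl (oh nh : Char) (ot nt : List Char) :
    ∀ (t p : List Char), nh ∉ p → p <+: repl (oh :: ot) (nh :: nt) t → p <+: t := by
  intro t
  induction ht : t.length using Nat.strong_induction_on generalizing t with
  | _ n ih =>
    cases t with
    | nil =>
      intro p hn hp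
      rw [repl_nil] at hp
      simpa using hp
    | cons c t' =>
      intro p hn hp
      cases p with
      | nil => exact List.nil_prefix
      | cons ph p' =>
        by_cases hm : (oh :: ot).isPrefixOf (c :: t')
        · rw [repl, if_pos hm] at hp
          have : ph = nh := (List.cons_prefix_cons.mp (by simpa using hp)).1
          exact absurd (by simp [this]) hn
        · rw [repl_cons_neg _ _ _ _ hm] at hp
          obtain ⟨he, hp'⟩ := List.cons_prefix_cons.mp hp
          subst he
          have : p' <+: t' := by
            rcases n with _ | m
            · simp at ht
            · exact ih (t'.length) (by simp at ht; omega) t' rfl p'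
                (fun hm2 => hn (by simp [hm2])) hp'
          exact List.cons_prefix_cons.mpr ⟨rfl, this⟩

-- A's five passes, fused: the composite of the five repl passes is B's single scan
theorem comp_eq_scanB : ∀ (l : List Char),
    repl [' '] rSpace (repl pFrom rFrom (repl pJoin rJoin
      (repl pSelect rSelect (repl pUnion rUnion l)))) = scanB l := by
  intro l
  induction hlen : l.length using Nat.strong_induction_on generalizing l with
  | _ n ih =>
    cases l with
    | nil => simp [repl_nil, scanB]
    | cons c t =>
      have hstep : ∀ m : Nat, m < n → ∀ l' : List Char, l'.length = m →
          repl [' '] rSpace (repl pFrom rFrom (repl pJoin rJoin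
            (repl pSelect rSelect (repl pUnion rUnion l')))) = scanB l' := ih
      have hstep' : ∀ m : Nat, m < n → ∀ l' : List Char, l'.length = m →
          repl [' '] rSpace (repl ('f' :: ['r','o','m']) rFrom (repl ('j' :: ['o','i','n']) rJoin
            (repl ('s' :: ['e','l','e','c','t']) rSelect
              (repl ('u' :: ['n','i','o','n']) rUnion l')))) = scanB l' := hstep
      by_cases hU : pUnion.isPrefixOf (c :: t)
      · obtain ⟨x, hx⟩ := List.isPrefixOf_iff_prefix.mp hU
        have hxdrop : x = t.drop 4 := by
          have := congrArg (List.drop 5) hx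
          simpa [pUnion] using this
        calc repl [' '] rSpace (repl pFrom rFrom (repl pJoin rJoin
              (repl pSelect rSelect (repl pUnion rUnion (c :: t)))))
            = repl [' '] rSpace (repl pFrom rFrom (repl pJoin rJoin
              (repl pSelect rSelect (rUnion ++ repl pUnion rUnion x)))) := by
              rw [← hx]; rw [show repl pUnion rUnion (pUnion ++ x)
                = rUnion ++ repl pUnion rUnion x from repl_append_self _ _ _ _]
          _ = rUnion ++ repl [' '] rSpace (repl pFrom rFrom (repl pJoin rJoin
              (repl pSelect rSelect (repl pUnion rUnion x)))) := by
              rw [show pSelect = 's' :: ['e','l','e','c','t'] from rfl,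
                repl_append_of_head_notin 's' _ _ rUnion (by decide),
                show pJoin = 'j' :: ['o','i','n'] from rfl,
                repl_append_of_head_notin 'j' _ _ rUnion (by decide),
                show pFrom = 'f' :: ['r','o','m'] from rfl,
                repl_append_of_head_notin 'f' _ _ rUnion (by decide),
                show [' '] = ' ' :: ([] : List Char) from rfl,
                repl_append_of_head_notin ' ' _ _ rUnion (by decide)]
          _ = rUnion ++ scanB x := by
              rw [hstep x.length (by rw [hxdrop, List.length_drop, ← hlen, List.length_cons]; omega) x rfl]
          _ = scanB (c :: t) := by rw [scanB, if_pos hU, hxdrop]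
      · by_cases hS : pSelect.isPrefixOf (c :: t)
        · obtain ⟨x, hx⟩ := List.isPrefixOf_iff_prefix.mp hS
          have hxdrop : x = t.drop 5 := by
            have := congrArg (List.drop 6) hx
            simpa [pSelect] using this
          calc repl [' '] rSpace (repl pFrom rFrom (repl pJoin rJoin
                (repl pSelect rSelect (repl pUnion rUnion (c :: t)))))
              = repl [' '] rSpace (repl pFrom rFrom (repl pJoin rJoin
                (repl pSelect rSelect (pSelect ++ repl pUnion rUnion x)))) := by
                rw [← hx, show pSelect = 's' :: ['e','l','e','c','t'] from rfl]
                rw [show pUnion = 'u' :: ['n','i','o','n'] from rfl,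
                  repl_append_of_head_notin 'u' _ _ ('s' :: ['e','l','e','c','t']) (by decide)]
            _ = repl [' '] rSpace (repl pFrom rFrom (repl pJoin rJoin
                (rSelect ++ repl pSelect rSelect (repl pUnion rUnion x)))) := by
                rw [show pSelect = 's' :: ['e','l','e','c','t'] from rfl, repl_append_self]
            _ = rSelect ++ repl [' '] rSpace (repl pFrom rFrom (repl pJoin rJoin
                (repl pSelect rSelect (repl pUnion rUnion x)))) := by
                rw [show pJoin = 'j' :: ['o','i','n'] from rfl,
                  repl_append_of_head_notin 'j' _ _ rSelect (by decide),
                  show pFrom = 'f' :: ['r','o','m'] from rfl,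
                  repl_append_of_head_notin 'f' _ _ rSelect (by decide),
                  show [' '] = ' ' :: ([] : List Char) from rfl,
                  repl_append_of_head_notin ' ' _ _ rSelect (by decide)]
            _ = rSelect ++ scanB x := by
                rw [hstep x.length (by rw [hxdrop, List.length_drop, ← hlen, List.length_cons]; omega) x rfl]
            _ = scanB (c :: t) := by rw [scanB, if_neg hU, if_pos hS, hxdrop]
        · by_cases hJ : pJoin.isPrefixOf (c :: t)
          · obtain ⟨x, hx⟩ := List.isPrefixOf_iff_prefix.mp hJ
            have hxdrop : x = t.drop 3 := by
              have := congrArg (List.drop 4) hx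
              simpa [pJoin] using this
            have hR : scanB (c :: t) = rJoin ++ scanB (t.drop 3) := by
              rw [scanB]; simp [hU, hS, hJ]
            rw [hR, ← hxdrop, ← hx,
              show pUnion = 'u' :: ['n','i','o','n'] from rfl,
              repl_append_of_head_notin 'u' _ _ pJoin (by decide),
              show pSelect = 's' :: ['e','l','e','c','t'] from rfl,
              repl_append_of_head_notin 's' _ _ pJoin (by decide),
              show pJoin = 'j' :: ['o','i','n'] from rfl,
              repl_append_self,
              show pFrom = 'f' :: ['r','o','m'] from rfl,
              repl_append_of_head_notin 'f' _ _ rJoin (by decide),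
              show [' '] = ' ' :: ([] : List Char) from rfl,
              repl_append_of_head_notin ' ' _ _ rJoin (by decide),
              hstep' x.length (by rw [hxdrop, List.length_drop, ← hlen, List.length_cons]; omega) x rfl]
          · by_cases hF : pFrom.isPrefixOf (c :: t)
            · obtain ⟨x, hx⟩ := List.isPrefixOf_iff_prefix.mp hF
              have hxdrop : x = t.drop 3 := by
                have := congrArg (List.drop 4) hx
                simpa [pFrom] using this
              have hR : scanB (c :: t) = rFrom ++ scanB (t.drop 3) := by
                rw [scanB]; simp [hU, hS, hJ, hF]
              rw [hR, ← hxdrop, ← hx,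
                show pUnion = 'u' :: ['n','i','o','n'] from rfl,
                repl_append_of_head_notin 'u' _ _ pFrom (by decide),
                show pSelect = 's' :: ['e','l','e','c','t'] from rfl,
                repl_append_of_head_notin 's' _ _ pFrom (by decide),
                show pJoin = 'j' :: ['o','i','n'] from rfl,
                repl_append_of_head_notin 'j' _ _ pFrom (by decide),
                show pFrom = 'f' :: ['r','o','m'] from rfl,
                repl_append_self,
                show [' '] = ' ' :: ([] : List Char) from rfl,
                repl_append_of_head_notin ' ' _ _ rFrom (by decide),
                hstep' x.length (by rw [hxdrop, List.length_drop, ← hlen, List.length_cons]; omega) x rfl]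
            · by_cases hSp : c = ' '
              · subst hSp
                have hR : scanB (' ' :: t) = rSpace ++ scanB t := by
                  rw [scanB]; simp [hU, hS, hJ, hF]
                rw [hR, show (' ' :: t) = [' '] ++ t by simp,
                  show pUnion = 'u' :: ['n','i','o','n'] from rfl,
                  repl_append_of_head_notin 'u' _ _ [' '] (by decide),
                  show pSelect = 's' :: ['e','l','e','c','t'] from rfl,
                  repl_append_of_head_notin 's' _ _ [' '] (by decide),
                  show pJoin = 'j' :: ['o','i','n'] from rfl,
                  repl_append_of_head_notin 'j' _ _ [' '] (by decide),
                  show pFrom = 'f' :: ['r','o','m'] from rfl,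
                  repl_append_of_head_notin 'f' _ _ [' '] (by decide),
                  repl_append_self ' ' [],
                  hstep' t.length (by rw [← hlen, List.length_cons]; omega) t rfl]
              · -- no key matches at this position: every pass copies c
                have h1 : repl pUnion rUnion (c :: t) = c :: repl pUnion rUnion t :=
                  repl_cons_neg _ _ _ _ hU
                have hS' : ¬ pSelect.isPrefixOf (c :: repl pUnion rUnion t) := by
                  intro h
                  obtain ⟨he, hp⟩ : 's' = c ∧ ['e','l','e','c','t'] <+: repl pUnion rUnion t := by
                    simpa [pSelect] using h
                  have ht : ['e','l','e','c','t'] <+: t :=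
                    prefix_repl 'u' 'U' ['n','i','o','n'] ['n','I','o','N'] t
                      ['e','l','e','c','t'] (by decide) hp
                  exact hS (by simp [pSelect, ← he]; exact ht)
                have h2 : repl pSelect rSelect (c :: repl pUnion rUnion t)
                    = c :: repl pSelect rSelect (repl pUnion rUnion t) :=
                  repl_cons_neg _ _ _ _ hS'
                have hJ' : ¬ pJoin.isPrefixOf
                    (c :: repl pSelect rSelect (repl pUnion rUnion t)) := by
                  intro h
                  obtain ⟨he, hp⟩ :
                      'j' = c ∧ ['o','i','n'] <+: repl pSelect rSelect (repl pUnion rUnion t) := by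
                    simpa [pJoin] using h
                  have ht : ['o','i','n'] <+: t :=
                    prefix_repl 'u' 'U' ['n','i','o','n'] ['n','I','o','N'] t ['o','i','n']
                      (by decide)
                      (prefix_repl 's' 's' ['e','l','e','c','t'] ['E','l','E','C','t']
                        (repl pUnion rUnion t) ['o','i','n'] (by decide) hp)
                  exact hJ (by simp [pJoin, ← he]; exact ht)
                have h3 : repl pJoin rJoin (c :: repl pSelect rSelect (repl pUnion rUnion t))
                    = c :: repl pJoin rJoin (repl pSelect rSelect (repl pUnion rUnion t)) :=
                  repl_cons_neg _ _ _ _ hJ'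
                have hF' : ¬ pFrom.isPrefixOf (c :: repl pJoin rJoin
                    (repl pSelect rSelect (repl pUnion rUnion t))) := by
                  intro h
                  obtain ⟨he, hp⟩ : 'f' = c ∧
                      ['r','o','m'] <+: repl pJoin rJoin (repl pSelect rSelect
                        (repl pUnion rUnion t)) := by
                    simpa [pFrom] using h
                  have ht : ['r','o','m'] <+: t :=
                    prefix_repl 'u' 'U' ['n','i','o','n'] ['n','I','o','N'] t ['r','o','m']
                      (by decide)
                      (prefix_repl 's' 's' ['e','l','e','c','t'] ['E','l','E','C','t']
                        (repl pUnion rUnion t) ['r','o','m'] (by decide)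
                        (prefix_repl 'j' 'j' ['o','i','n'] ['O','i','N']
                          (repl pSelect rSelect (repl pUnion rUnion t)) ['r','o','m']
                          (by decide) hp))
                  exact hF (by simp [pFrom, ← he]; exact ht)
                have h4 : repl pFrom rFrom (c :: repl pJoin rJoin
                      (repl pSelect rSelect (repl pUnion rUnion t)))
                    = c :: repl pFrom rFrom (repl pJoin rJoin
                      (repl pSelect rSelect (repl pUnion rUnion t))) :=
                  repl_cons_neg _ _ _ _ hF'
                have hSp' : ¬ ([' '] : List Char).isPrefixOf (c :: repl pFrom rFrom
                    (repl pJoin rJoin (repl pSelect rSelect (repl pUnion rUnion t)))) := by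
                  simp only [List.isPrefixOf, Bool.and_eq_true, beq_iff_eq]
                  intro h
                  exact hSp h.1.symm
                have h5 : repl [' '] rSpace (c :: repl pFrom rFrom (repl pJoin rJoin
                      (repl pSelect rSelect (repl pUnion rUnion t))))
                    = c :: repl [' '] rSpace (repl pFrom rFrom (repl pJoin rJoin
                      (repl pSelect rSelect (repl pUnion rUnion t)))) :=
                  repl_cons_neg _ _ _ _ hSp'
                have hR : scanB (c :: t) = c :: scanB t := by
                  rw [scanB]; simp [hU, hS, hJ, hF, hSp]
                rw [hR, h1, h2, h3, h4, h5,
                  hstep t.length (by rw [← hlen, List.length_cons]; omega) t rfl]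

-- ===== VERDICT (by name: the statement is the Claim_ definition above) =====
theorem bypass_spec : Claim_equal_bypass := by
  intro query _
  show bypass query = bypass_alt query
  have hA : bypass query = String.ofList (repl [' '] rSpace (repl pFrom rFrom (repl pJoin rJoin
      (repl pSelect rSelect (repl pUnion rUnion query.toList))))) := by
    simp only [bypass, List.foldl, PySem.Str.replace, String.toList_ofList]
    rw [replace_eq_repl _ _ _ (by decide), replace_eq_repl _ _ _ (by decide),
      replace_eq_repl _ _ _ (by decide), replace_eq_repl _ _ _ (by decide),
      replace_eq_repl _ _ _ (by decide)]
    rfl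
  rw [hA, comp_eq_scanB]
  rfl
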